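-- pv_equiv track=rewrite | github.com/Mapet13/Studia | ćwiczenia 4/18.py | get_biggest_sum
-- ===== SOURCE A (Python) =====
-- def get_biggest_sum(t):
--     n = len(t)
--
--     best = 0
--
--     for i in range(n):
--         current_sum_x = t[i][0]
--         current_sum_y = t[0][i]
--         for j in range(1, n):
--             if j >= 10:
--                 best = max(best, current_sum_x, current_sum_y)
--                 current_sum_x -= t[i][j-10]
--                 current_sum_y -= t[j-10][i]
--             current_sum_x += t[i][j]
--             current_sum_y += t[j][i]
--         best = max(best, current_sum_x, current_sum_y)
--
--     return best
-- ===== SOURCE B (Python) =====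
-- def get_biggest_sum(t):
--     n = len(t)
--     w = n if n < 10 else 10
--     best = 0
--     for i in range(n):
--         row = t[i]
--         col = [t[k][i] for k in range(n)]
--         for s in range(n - w + 1):
--             best = max(best, sum(row[s:s+w]), sum(col[s:s+w]))
--     return best
-- ===== Notes on version B (the rewrite author's own statement) =====
-- stated objective: simpler
-- what changed: Replaces the running add/subtract window state and the j>=10 branch by a uniform loop over window starts that sums each width-min(10,n) slice of the row and of the materialised column directly.
import Mathlib
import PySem

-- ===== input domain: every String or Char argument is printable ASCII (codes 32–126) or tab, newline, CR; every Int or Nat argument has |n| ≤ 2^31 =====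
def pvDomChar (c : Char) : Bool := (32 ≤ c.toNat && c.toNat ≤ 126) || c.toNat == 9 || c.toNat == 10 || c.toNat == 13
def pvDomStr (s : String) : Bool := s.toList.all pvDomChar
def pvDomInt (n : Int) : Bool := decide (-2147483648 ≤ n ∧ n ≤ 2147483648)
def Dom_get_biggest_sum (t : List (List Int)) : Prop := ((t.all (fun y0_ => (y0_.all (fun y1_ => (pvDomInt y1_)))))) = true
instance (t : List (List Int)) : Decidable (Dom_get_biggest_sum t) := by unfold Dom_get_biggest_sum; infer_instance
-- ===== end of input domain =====

-- B replaces A's running add/subtract window state (and its j>=10 branch) by a uniform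
-- loop over window starts that sums each width-min(10,n) slice of the row / column directly.

-- ===== PORT A =====
def get_biggest_sum (t : List (List Int)) : Int :=
  let n : Int := t.length
  (PySem.List.pyRange 0 n 1).foldl (fun best i =>
    let st := (PySem.List.pyRange 1 n 1).foldl (fun (st : Int × Int × Int) j =>
        let st2 := if j ≥ 10 then
            (max (max st.1 st.2.1) st.2.2,
             st.2.1 - PySem.List.pyGetD (PySem.List.pyGetD t i []) (j - 10) 0,
             st.2.2 - PySem.List.pyGetD (PySem.List.pyGetD t (j - 10) []) i 0)
          else st
        (st2.1,
         st2.2.1 + PySem.List.pyGetD (PySem.List.pyGetD t i []) j 0,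
         st2.2.2 + PySem.List.pyGetD (PySem.List.pyGetD t j []) i 0))
      (best,
       PySem.List.pyGetD (PySem.List.pyGetD t i []) 0 0,
       PySem.List.pyGetD (PySem.List.pyGetD t 0 []) i 0)
    max (max st.1 st.2.1) st.2.2) 0

-- ===== PORT B =====
def get_biggest_sum_alt (t : List (List Int)) : Int :=
  let n : Int := t.length
  let w : Int := if n < 10 then n else 10
  (PySem.List.pyRange 0 n 1).foldl (fun best i =>
    let row := PySem.List.pyGetD t i []
    let col := (PySem.List.pyRange 0 n 1).map (fun k =>
      PySem.List.pyGetD (PySem.List.pyGetD t k []) i 0)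
    (PySem.List.pyRange 0 (n - w + 1) 1).foldl (fun best s =>
      max (max best (PySem.List.slice row (some s) (some (s + w))).sum)
        (PySem.List.slice col (some s) (some (s + w))).sum) best) 0

-- ===== PRECONDITION & SPEC =====
-- Pre_ excludes exactly the inputs where A raises IndexError: some row shorter than len(t).
def Pre_get_biggest_sum (t : List (List Int)) : Prop := ∀ r ∈ t, t.length ≤ r.length
instance (t : List (List Int)) : Decidable (Pre_get_biggest_sum t) := by
  unfold Pre_get_biggest_sum; infer_instance
def pvWitness_get_biggest_sum : List (List Int) := [[1, -2], [3, 4]]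
def Spec_get_biggest_sum (t : List (List Int)) (out : Int) : Prop := out = get_biggest_sum_alt t
instance (t : List (List Int)) (out : Int) : Decidable (Spec_get_biggest_sum t out) := by
  unfold Spec_get_biggest_sum; infer_instance

-- ===== CLAIM (what is proved, stated in full; the proofs are below) =====
def Claim_equal_get_biggest_sum : Prop := ∀ (t : List (List Int)), Dom_get_biggest_sum t →
  Pre_get_biggest_sum t → Spec_get_biggest_sum t (get_biggest_sum t)

-- ===== LEMMAS AND PROOFS =====

/-- sum of the window of `r` of width `w` starting at `s` -/
def wsum (r : List Int) (s w : Nat) : Int := ((r.drop s).take w).sum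

/-- the common per-window step both programs reduce to -/
def gstep (r c : List Int) (w : Nat) (b : Int) (s : Nat) : Int :=
  max (max b (wsum r s w)) (wsum c s w)

lemma wsum_zero_one (r : List Int) (h : 1 ≤ r.length) :
    wsum r 0 1 = PySem.List.pyGetD r 0 0 := by
  cases r with
  | nil => simp at h
  | cons a l => simp [wsum, PySem.List.pyGetD_zero_cons]

lemma wsum_extend (r : List Int) (s w : Nat) (h : s + w < r.length) :
    wsum r s (w + 1) = wsum r s w + r.getD (s + w) 0 := by
  unfold wsum
  have h1 : (r.drop s)[w]? = some r[s + w] := by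
    rw [List.getElem?_drop]; exact List.getElem?_eq_getElem h
  rw [List.take_add_one, List.sum_append, h1, List.getD_eq_getElem r 0 h]
  simp

lemma wsum_head (r : List Int) (s w : Nat) (h : s < r.length) :
    wsum r s (w + 1) = r.getD s 0 + wsum r (s + 1) w := by
  unfold wsum
  rw [List.drop_eq_getElem_cons h, List.take_succ_cons, List.sum_cons,
    List.getD_eq_getElem r 0 h]

/-- A's inner loop, with the row `r` and the column `c` abstracted out, computes the
running width-`min 10 m` window sums and the running max over all earlier windows. -/
lemma innerA (r c : List Int) (n : Nat) (hr : n ≤ r.length) (hc : n ≤ c.length) (b0 : Int)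
    (m : Nat) (h1 : 1 ≤ m) (hm : m ≤ n) :
    List.foldl
      (fun (st : Int × Int × Int) (j : Int) =>
        ((if j ≥ 10 then
              (max (max st.1 st.2.1) st.2.2, st.2.1 - PySem.List.pyGetD r (j - 10) 0,
                st.2.2 - PySem.List.pyGetD c (j - 10) 0)
            else st).1,
          (if j ≥ 10 then
                (max (max st.1 st.2.1) st.2.2, st.2.1 - PySem.List.pyGetD r (j - 10) 0,
                  st.2.2 - PySem.List.pyGetD c (j - 10) 0)
              else st).2.1 +
            PySem.List.pyGetD r j 0,
          (if j ≥ 10 then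
                (max (max st.1 st.2.1) st.2.2, st.2.1 - PySem.List.pyGetD r (j - 10) 0,
                  st.2.2 - PySem.List.pyGetD c (j - 10) 0)
              else st).2.2 +
            PySem.List.pyGetD c j 0))
      (b0, PySem.List.pyGetD r 0 0, PySem.List.pyGetD c 0 0) (PySem.List.pyRange 1 (m : Int) 1)
    = ((List.range (m - 10)).foldl (fun b s => max (max b (wsum r s 10)) (wsum c s 10)) b0,
       wsum r (m - 10) (min 10 m), wsum c (m - 10) (min 10 m)) := by
  induction m with
  | zero => omega
  | succ m ih =>
    by_cases hm0 : m = 0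
    · subst hm0
      have h0 : PySem.List.pyRange 1 ((0 + 1 : Nat) : Int) 1 = [] :=
        PySem.List.pyRange_one_eq_nil (by norm_num)
      rw [h0, List.foldl_nil]
      norm_num [wsum_zero_one r (by omega), wsum_zero_one c (by omega)]
    · have hm1 : 1 ≤ m := Nat.one_le_iff_ne_zero.mpr hm0
      have hmn : m ≤ n := by omega
      have hcast2 : ((m + 1 : Nat) : Int) = (m : Int) + 1 := by push_cast; ring
      rw [hcast2, PySem.List.pyRange_one_succ_right (by exact_mod_cast hm1),
        List.foldl_append, ih hm1 hmn, List.foldl_cons, List.foldl_nil]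
      dsimp only
      by_cases h10 : 10 ≤ m
      · have hge : ((m : Int) ≥ 10) := by exact_mod_cast h10
        rw [if_pos hge]
        dsimp only
        rw [show ((m : Int) - 10) = ((m - 10 : Nat) : Int) from by omega]
        simp only [PySem.List.pyGetD_natCast, Prod.mk.injEq]
        have er1 := wsum_extend r (m - 10) 10 (by omega)
        have er2 := wsum_head r (m - 10) 10 (by omega)
        rw [show m - 10 + 10 = m from by omega] at er1
        rw [show m - 10 + 1 = m + 1 - 10 from by omega] at er2
        have ec1 := wsum_extend c (m - 10) 10 (by omega)
        have ec2 := wsum_head c (m - 10) 10 (by omega)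
        rw [show m - 10 + 10 = m from by omega] at ec1
        rw [show m - 10 + 1 = m + 1 - 10 from by omega] at ec2
        refine ⟨?_, ?_, ?_⟩
        · rw [show min 10 m = 10 from by omega,
            show m + 1 - 10 = (m - 10) + 1 from by omega,
            List.range_succ, List.foldl_append, List.foldl_cons, List.foldl_nil]
        · rw [show min 10 m = 10 from by omega, show min 10 (m + 1) = 10 from by omega]
          omega
        · rw [show min 10 m = 10 from by omega, show min 10 (m + 1) = 10 from by omega]
          omega
      · have hlt : ¬ ((m : Int) ≥ 10) := by
          intro h; exact h10 (by exact_mod_cast h)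
        rw [if_neg hlt]
        dsimp only
        simp only [PySem.List.pyGetD_natCast, Prod.mk.injEq]
        have er := wsum_extend r 0 m (by omega)
        have ec := wsum_extend c 0 m (by omega)
        rw [Nat.zero_add] at er ec
        refine ⟨?_, ?_, ?_⟩
        · rw [show m + 1 - 10 = 0 from by omega, show m - 10 = 0 from by omega]
        · rw [show min 10 m = m from by omega, show min 10 (m + 1) = m + 1 from by omega,
            show m - 10 = 0 from by omega, show m + 1 - 10 = 0 from by omega, er]
        · rw [show min 10 m = m from by omega, show min 10 (m + 1) = m + 1 from by omega,
            show m - 10 = 0 from by omega, show m + 1 - 10 = 0 from by omega, ec]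

/-- B's per-line loop over window starts is the canonical fold of `gstep`. -/
lemma lineB (r c : List Int) (n : Nat) (w : Int) (hw : w = ((min 10 n : Nat) : Int)) (b0 : Int) :
    List.foldl
      (fun best s =>
        max (max best (PySem.List.slice r (some s) (some (s + w))).sum)
          (PySem.List.slice c (some s) (some (s + w))).sum)
      b0 (PySem.List.pyRange 0 ((n : Int) - w + 1) 1)
    = (List.range (n - min 10 n + 1)).foldl (gstep r c (min 10 n)) b0 := by
  subst hw
  have hcast : (n : Int) - ((min 10 n : Nat) : Int) + 1 = ((n - min 10 n + 1 : Nat) : Int) := by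
    omega
  rw [hcast, PySem.List.pyRange_zero_nat, List.foldl_map]
  apply PySem.List.foldl_congr_mem
  intro b s _
  rw [PySem.List.slice_natCast_add r s (min 10 n), PySem.List.slice_natCast_add c s (min 10 n)]
  rfl

/-- looking a column element up through the materialised column list agrees with
the nested lookup, at every integer index (both default to 0 out of range). -/
lemma col_lookup (t : List (List Int)) (k : Nat) (j : Int) :
    PySem.List.pyGetD (PySem.List.pyGetD t j []) (↑k) 0 =
      PySem.List.pyGetD
        (List.map (fun j' => PySem.List.pyGetD (PySem.List.pyGetD t j' []) (↑k) 0)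
          (PySem.List.pyRange 0 (↑t.length) 1)) j 0 := by
  set L := List.map (fun j' => PySem.List.pyGetD (PySem.List.pyGetD t j' []) (↑k) 0)
      (PySem.List.pyRange 0 (↑t.length) 1) with hLdef
  have hL : L.length = t.length := by
    rw [hLdef]; simp [PySem.List.length_pyRange_one]
  by_cases h1 : 0 ≤ j ∧ j < (t.length : Int)
  · rw [hLdef, PySem.List.pyGetD_map_pyRange_of_nonneg _ _ _ _ h1.1 h1.2]
  · by_cases h2 : -(t.length : Int) ≤ j ∧ j < 0
    · have hm0 : 0 < (-j).toNat := by omega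
      rw [show j = -(((-j).toNat : Nat) : Int) from by omega]
      rw [PySem.List.pyGetD_neg_natCast t (-j).toNat [] hm0 (by omega)]
      rw [PySem.List.pyGetD_neg_natCast L (-j).toNat 0 hm0 (by omega)]
      simp only [hL]
      simp only [hLdef]
      simp only [List.getElem_map, PySem.List.getElem_pyRange_one, zero_add]
      rw [PySem.List.pyGetD_natCast t,
        List.getD_eq_getElem t [] (show t.length - (-j).toNat < t.length from by omega),
        PySem.List.pyGetD_natCast]
    · have hg1 : PySem.List.pyGetD t j [] = [] := by
        apply PySem.List.pyGetD_of_none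
        rw [PySem.List.pyGet?_eq_none_iff]
        unfold PySem.Raise.InRange
        omega
      have hg2 : PySem.List.pyGetD L j 0 = 0 := by
        apply PySem.List.pyGetD_of_none
        rw [PySem.List.pyGet?_eq_none_iff]
        unfold PySem.Raise.InRange
        omega
      rw [hg1, hg2]
      simp [PySem.List.pyGetD_natCast]

-- ===== VERDICT (by name: the statement is the Claim_ definition above) =====
theorem get_biggest_sum_spec : Claim_equal_get_biggest_sum := by
  intro t _ hpre
  show get_biggest_sum t = get_biggest_sum_alt t
  unfold get_biggest_sum get_biggest_sum_alt
  dsimp only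
  by_cases hn0 : t.length = 0
  · rw [hn0]; rfl
  · have hn : 1 ≤ t.length := Nat.one_le_iff_ne_zero.mpr hn0
    apply PySem.List.foldl_congr_mem
    intro acc i hi
    rw [PySem.List.mem_pyRange_one] at hi
    obtain ⟨hi0, hi1⟩ := hi
    lift i to ℕ using hi0 with k
    have hk : k < t.length := by exact_mod_cast hi1
    set r : List Int := PySem.List.pyGetD t (↑k) [] with hr_def
    set c : List Int := List.map
      (fun j => PySem.List.pyGetD (PySem.List.pyGetD t j []) (↑k) 0)
      (PySem.List.pyRange 0 (↑t.length) 1) with hc_def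
    have hr : t.length ≤ r.length := by
      have : r = t[k] := by
        rw [hr_def, PySem.List.pyGetD_natCast, List.getD_eq_getElem t [] hk]
      rw [this]
      exact hpre _ (List.getElem_mem hk)
    have hc : t.length ≤ c.length := by
      rw [hc_def]
      simp [PySem.List.length_pyRange_one]
    have hcol : ∀ j : Int, PySem.List.pyGetD (PySem.List.pyGetD t j []) (↑k) 0
        = PySem.List.pyGetD c j 0 := by
      intro j
      rw [hc_def]
      exact col_lookup t k j
    simp only [hcol]
    rw [innerA r c t.length hr hc acc t.length hn le_rfl]
    rw [lineB r c t.length (if (t.length : Int) < 10 then (t.length : Int) else 10)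
      (by split_ifs <;> omega) acc]
    by_cases h10 : 10 ≤ t.length
    · rw [show min 10 t.length = 10 from by omega,
        show t.length - 10 + 1 = (t.length - 10) + 1 from rfl,
        List.range_succ, List.foldl_append, List.foldl_cons, List.foldl_nil]
      rfl
    · rw [show min 10 t.length = t.length from by omega,
        show t.length - 10 = 0 from by omega,
        show t.length - t.length + 1 = 1 from by omega]
      simp [gstep, List.range_one]
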